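-- pv_equiv track=rewrite | github.com/prerittameta/prepDSA | bitwise.py | q9_magic_number
-- ===== SOURCE A (Python) =====
-- def q9_magic_number(n):
--     ans = 0
--     base = 5
--     while(n>0):
--         last = n&1
--         n = n>>1
--         ans += last*base
--         base = base*5
--     return ans
-- ===== SOURCE B (Python) =====
-- def q9_magic_number(n):
--     return int(bin(n)[2:], 5) * 5 if n > 0 else 0
-- ===== Notes on version B (the rewrite author's own statement) =====
-- stated objective: idiomatic
-- what changed: Replaces the bit-by-bit accumulation loop with a single closed-form expression: interpret n's binary representation as a base-5 numeral and multiply by 5 (guarded by n > 0, where A's loop body never runs and it returns 0).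
import Mathlib
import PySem

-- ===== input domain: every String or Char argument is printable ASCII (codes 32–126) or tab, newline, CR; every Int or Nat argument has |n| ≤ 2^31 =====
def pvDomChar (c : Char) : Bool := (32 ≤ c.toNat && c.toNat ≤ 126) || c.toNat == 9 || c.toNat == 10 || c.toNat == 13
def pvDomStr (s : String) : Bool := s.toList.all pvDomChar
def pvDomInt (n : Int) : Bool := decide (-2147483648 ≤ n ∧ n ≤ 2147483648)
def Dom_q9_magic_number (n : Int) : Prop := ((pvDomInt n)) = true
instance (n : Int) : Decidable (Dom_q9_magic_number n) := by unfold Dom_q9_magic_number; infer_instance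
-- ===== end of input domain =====

-- B replaces A's bit-accumulation loop with the closed form int(bin(n)[2:], 5) * 5 (idiomatic; same cost).

-- ===== PORT A =====
-- the while-loop of A, state (n, ans, base)
def pvLoopA (n ans base : Int) : Int :=
  if hpos : n > 0 then
    pvLoopA (n >>> (1:Nat)) (ans + PySem.Int.band n 1 * base) (base * 5)
  else ans
termination_by n.toNat
decreasing_by
  rcases n with m | m
  · simp only [Int.shiftRight_eq, Int.shiftRight, Nat.shiftRight_succ, Nat.shiftRight_zero, Int.toNat_natCast, Int.ofNat_eq_natCast] at hpos ⊢
    omega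
  · omega

def q9_magic_number (n : Int) : Int := pvLoopA n 0 5

-- ===== PORT B =====
-- bin(m)[2:] as a list of '0'/'1' characters (empty for m = 0; B only calls it with m > 0)
def pvBin (m : Nat) : List Char :=
  if m = 0 then [] else pvBin (m / 2) ++ [if m % 2 = 1 then '1' else '0']

-- int(s, 5): left-to-right base-5 parse of a digit string
def pvParse5 (s : List Char) : Int :=
  s.foldl (fun a c => a * 5 + ((c.toNat : Int) - 48)) 0

def q9_magic_number_alt (n : Int) : Int :=
  if n > 0 then pvParse5 (pvBin n.toNat) * 5 else 0

-- ===== PRECONDITION & SPEC =====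
def Spec_q9_magic_number (n : Int) (out : Int) : Prop := out = q9_magic_number_alt n
instance (n : Int) (out : Int) : Decidable (Spec_q9_magic_number n out) := by unfold Spec_q9_magic_number; infer_instance

-- ===== CLAIM (what is proved, stated in full; the proofs are below) =====
def Claim_equal_q9_magic_number : Prop := ∀ (n : Int), Dom_q9_magic_number n → Spec_q9_magic_number n (q9_magic_number n)

-- ===== LEMMAS AND PROOFS =====

-- parse of s ++ [digit] peels the last digit
theorem pvParse5_append (s : List Char) (c : Char) :
    pvParse5 (s ++ [c]) = pvParse5 s * 5 + ((c.toNat : Int) - 48) := by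
  simp [pvParse5, List.foldl_append]

-- recurrence for the base-5 value of the binary string
theorem pvParse5_pvBin (m : Nat) (hm : m ≠ 0) :
    pvParse5 (pvBin m) = pvParse5 (pvBin (m / 2)) * 5 + ((m % 2 : Nat) : Int) := by
  rw [pvBin, if_neg hm, pvParse5_append]
  rcases Nat.mod_two_eq_zero_or_one m with h | h <;> simp [h]

-- A's loop computes ans + base * (base-5 value of the binary string)
theorem pvLoopA_eq (m : Nat) : ∀ ans base : Int,
    pvLoopA (m : Int) ans base = ans + base * pvParse5 (pvBin m) := by
  induction m using Nat.strong_induction_on with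
  | _ m ih =>
    intro ans base
    rcases Nat.eq_zero_or_pos m with h0 | h0
    · subst h0
      rw [pvLoopA]
      simp [pvBin, pvParse5]
    · rw [pvLoopA, dif_pos (by exact_mod_cast h0)]
      have hsh : ((m : Int) >>> (1 : ℕ)) = ((m / 2 : Nat) : Int) := by
        simp [Int.shiftRight_eq, Int.shiftRight, Nat.shiftRight_succ]
      have hband : PySem.Int.band (m : Int) 1 = ((m % 2 : Nat) : Int) := by
        have := PySem.Int.band_natCast m 1
        simpa [Nat.and_one_is_mod] using this
      rw [hsh, hband, ih (m / 2) (Nat.div_lt_self h0 (by norm_num)),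
          pvParse5_pvBin m (Nat.pos_iff_ne_zero.mp h0)]
      push_cast
      ring

-- ===== VERDICT (by name: the statement is the Claim_ definition above) =====
theorem q9_magic_number_spec : Claim_equal_q9_magic_number := by
  intro n _
  unfold Spec_q9_magic_number q9_magic_number q9_magic_number_alt
  by_cases hn : n > 0
  · rw [if_pos hn]
    have h : n = ((n.toNat : Nat) : Int) := (Int.toNat_of_nonneg (le_of_lt hn)).symm
    conv_lhs => rw [h]
    rw [pvLoopA_eq]
    ring
  · rw [if_neg hn, pvLoopA, dif_neg hn]
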